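-- pv_equiv track=rewrite | github.com/accern-utsavgarg/accern-devops-images | helm-chart/scripts/scale_worker.py | get_dag_uri
-- ===== SOURCE A (Python) =====
-- from typing import Optional, Tuple, TypedDict
--
-- def get_dag_uri(
--         namespace: Optional[str],
--         dag: Optional[str],
--         topic: Optional[str]) -> Tuple[Optional[str], str]:
--     if dag is not None:
--         return namespace, dag
--     if topic is None:
--         raise ValueError("must specify either dag URI or kafka topic")
--     orig_topic = topic
--     nochop = True
--     for chop in ["xyme-output-", "xyme-input-"]:
--         if topic.startswith(chop):
--             topic = topic[len(chop):]
--             nochop = False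
--             break
--     if nochop:
--         raise ValueError(f"unknown kafka topic format: {orig_topic}")
--     segs = topic.split("-")
--     if len(segs) < 4:
--         raise ValueError(f"kafka topic too short: {orig_topic}")
--     if namespace is None:
--         namespace = segs[0]
--     connector = segs[1]
--     location = None
--     address = None
--     uid = None
--     pos = len(segs) - 1
--     while pos > 1:
--         cur = segs[pos]
--         if uid is None:
--             if len(cur) == 32:
--                 uid = cur
--         elif address is None:
--             address = cur
--         elif location is None:
--             location = cur
--         else:
--             location = f"{cur}-{location}"
--         pos -= 1
--     if address is None or uid is None:
--         raise ValueError(f"missing address or UUID: {orig_topic}")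
--     if location is None:
--         location = ""
--     else:
--         location = f"{location}@"
--     return namespace, f"{connector}://{location}{address}/dag/b{uid}"
-- ===== SOURCE B (Python) =====
-- from typing import Optional, Tuple
--
--
-- def get_dag_uri(
--         namespace: Optional[str],
--         dag: Optional[str],
--         topic: Optional[str]) -> Tuple[Optional[str], str]:
--     if dag is not None:
--         return namespace, dag
--     if topic is None:
--         raise ValueError("must specify either dag URI or kafka topic")
--     rest = None
--     for chop in ("xyme-output-", "xyme-input-"):
--         if topic.startswith(chop):
--             rest = topic[len(chop):]
--             break
--     if rest is None:
--         raise ValueError(f"unknown kafka topic format: {topic}")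
--     segs = rest.split("-")
--     if len(segs) < 4:
--         raise ValueError(f"kafka topic too short: {topic}")
--     p = next((i for i in range(len(segs) - 1, 1, -1) if len(segs[i]) == 32),
--              None)
--     if p is None or p < 3:
--         raise ValueError(f"missing address or UUID: {topic}")
--     location = "" if p == 3 else "-".join(segs[2:p - 1]) + "@"
--     if namespace is None:
--         namespace = segs[0]
--     return namespace, f"{segs[1]}://{location}{segs[p - 1]}/dag/b{segs[p]}"
-- ===== Notes on version B (the rewrite author's own statement) =====
-- stated objective: simpler
-- what changed: A walks the segments right-to-left with a uid/address/location state machine that accumulates the location string piece by piece; B instead locates the rightmost 32-char segment index p and reads the answer off directly as segs[p], segs[p-1] and '-'.join(segs[2:p-1]).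
import Mathlib
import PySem

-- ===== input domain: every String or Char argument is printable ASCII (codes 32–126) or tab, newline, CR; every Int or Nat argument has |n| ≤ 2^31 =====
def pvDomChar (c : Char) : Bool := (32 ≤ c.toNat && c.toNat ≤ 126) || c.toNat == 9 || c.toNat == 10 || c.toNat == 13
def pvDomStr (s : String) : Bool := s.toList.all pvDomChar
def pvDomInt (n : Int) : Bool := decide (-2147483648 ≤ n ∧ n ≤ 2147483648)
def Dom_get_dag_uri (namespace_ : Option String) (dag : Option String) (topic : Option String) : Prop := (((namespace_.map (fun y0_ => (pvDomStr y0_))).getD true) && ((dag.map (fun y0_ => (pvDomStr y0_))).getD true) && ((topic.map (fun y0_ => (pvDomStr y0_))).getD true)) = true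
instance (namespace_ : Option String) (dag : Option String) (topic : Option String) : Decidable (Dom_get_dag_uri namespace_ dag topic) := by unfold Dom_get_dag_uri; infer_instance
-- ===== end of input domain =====

-- B replaces A's right-to-left state machine (uid/address/location accumulator) by locating the
-- rightmost 32-char segment index and reading the answer off with a slice and a join (objective:
-- simpler). Equivalence of the RETURN value on Pre_ (the inputs where A returns; A raises elsewhere).

-- ===== PORT A =====
-- the 'while pos > 1' loop of A, state (location, address, uid), pos counting down
def pvALoop (segs : List String) (loc addr uid : Option String) : Nat → Option String × Option String × Option String
  | 0 => (loc, addr, uid)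
  | 1 => (loc, addr, uid)
  | (pos+2) =>
    let cur := segs.getD (pos+2) ""
    match uid with
    | none =>
      if PySem.Str.len cur = 32 then pvALoop segs loc addr (some cur) (pos+1)
      else pvALoop segs loc addr none (pos+1)
    | some u =>
      match addr with
      | none => pvALoop segs loc (some cur) (some u) (pos+1)
      | some a =>
        match loc with
        | none => pvALoop segs (some cur) (some a) (some u) (pos+1)
        | some l => pvALoop segs (some (cur ++ "-" ++ l)) (some a) (some u) (pos+1)

def get_dag_uri (namespace_ : Option String) (dag : Option String) (topic : Option String) : Option String × String :=
  match dag with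
  | some d => (namespace_, d)
  | none =>
    match topic with
    | none => (none, "")  -- ValueError "must specify either dag URI or kafka topic": outside Pre_
    | some t =>
      -- the for-loop over the two chop prefixes with break / nochop flag
      let chopped : String × Bool :=
        if PySem.Str.startswith t "xyme-output-" then
          (PySem.Str.slice t (some (PySem.Str.len "xyme-output-")) none, false)
        else if PySem.Str.startswith t "xyme-input-" then
          (PySem.Str.slice t (some (PySem.Str.len "xyme-input-")) none, false)
        else (t, true)
      if chopped.2 then (none, "")  -- ValueError "unknown kafka topic format": outside Pre_
      else
        match PySem.Str.split? chopped.1 "-" with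
        | none => (none, "")  -- unreachable: the separator "-" is nonempty
        | some segs =>
          if segs.length < 4 then (none, "")  -- ValueError "kafka topic too short": outside Pre_
          else
            let ns : Option String :=
              match namespace_ with
              | none => some (segs.getD 0 "")
              | some n => some n
            let connector := segs.getD 1 ""
            match pvALoop segs none none none (segs.length - 1) with
            | (loc, some address, some uid) =>
              let location :=
                match loc with
                | none => ""
                | some l => l ++ "@"
              (ns, connector ++ "://" ++ location ++ address ++ "/dag/b" ++ uid)
            | _ => (none, "")  -- ValueError "missing address or UUID": outside Pre_

-- ===== PORT B =====
-- next((i for i in range(len(segs) - 1, 1, -1) if len(segs[i]) == 32), None)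
def pvFindP (segs : List String) : Nat → Option Nat
  | 0 => none
  | 1 => none
  | (i+2) =>
    if PySem.Str.len (segs.getD (i+2) "") = 32 then some (i+2) else pvFindP segs (i+1)

def get_dag_uri_alt (namespace_ : Option String) (dag : Option String) (topic : Option String) : Option String × String :=
  match dag with
  | some d => (namespace_, d)
  | none =>
    match topic with
    | none => (none, "")  -- raise: outside Pre_
    | some t =>
      let rest? : Option String :=
        if PySem.Str.startswith t "xyme-output-" then
          some (PySem.Str.slice t (some (PySem.Str.len "xyme-output-")) none)
        else if PySem.Str.startswith t "xyme-input-" then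
          some (PySem.Str.slice t (some (PySem.Str.len "xyme-input-")) none)
        else none
      match rest? with
      | none => (none, "")  -- raise: outside Pre_
      | some rest =>
        match PySem.Str.split? rest "-" with
        | none => (none, "")  -- unreachable: the separator "-" is nonempty
        | some segs =>
          if segs.length < 4 then (none, "")  -- raise: outside Pre_
          else
            match pvFindP segs (segs.length - 1) with
            | none => (none, "")  -- raise: outside Pre_
            | some p =>
              if p < 3 then (none, "")  -- raise: outside Pre_
              else
                let location :=
                  if p = 3 then ""
                  else PySem.Str.join "-" (PySem.List.slice segs (some 2) (some ((p : Int) - 1))) ++ "@"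
                let ns : Option String :=
                  match namespace_ with
                  | none => some (segs.getD 0 "")
                  | some n => some n
                (ns, segs.getD 1 "" ++ "://" ++ location ++ segs.getD (p-1) "" ++ "/dag/b" ++ segs.getD p "")

-- ===== PRECONDITION & SPEC =====
-- the segments A computes for topic string t (prefix chop, then split on "-")
def pvSegsOf (t : String) : List String :=
  (PySem.Str.split?
    (if PySem.Str.startswith t "xyme-output-" then PySem.Str.slice t (some 12) none
     else PySem.Str.slice t (some 11) none) "-").getD []

-- Pre_ = exactly the inputs where the Python A returns (A raises ValueError on all others):
-- a dag URI is given, or the topic carries a known prefix, splits into >= 4 segments and has a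
-- 32-char segment at some index >= 3.
def Pre_get_dag_uri (namespace_ : Option String) (dag : Option String) (topic : Option String) : Prop :=
  dag.isSome = true ∨
  ((PySem.Str.startswith (topic.getD "") "xyme-output-" = true ∨
    PySem.Str.startswith (topic.getD "") "xyme-input-" = true) ∧
   4 ≤ (pvSegsOf (topic.getD "")).length ∧
   ∃ p < (pvSegsOf (topic.getD "")).length,
     3 ≤ p ∧ PySem.Str.len ((pvSegsOf (topic.getD "")).getD p "") = 32)

instance (namespace_ : Option String) (dag : Option String) (topic : Option String) : Decidable (Pre_get_dag_uri namespace_ dag topic) := by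
  unfold Pre_get_dag_uri; infer_instance

def pvWitness_get_dag_uri : Option String × Option String × Option String :=
  (none, none, some "xyme-output-ns-kafka-loc-addr-0123456789abcdef0123456789abcdef")

def Spec_get_dag_uri (namespace_ : Option String) (dag : Option String) (topic : Option String) (out : Option String × String) : Prop := out = get_dag_uri_alt namespace_ dag topic
instance (namespace_ : Option String) (dag : Option String) (topic : Option String) (out : Option String × String) : Decidable (Spec_get_dag_uri namespace_ dag topic out) := by unfold Spec_get_dag_uri; infer_instance

-- ===== CLAIM (what is proved, stated in full; the proofs are below) =====
def Claim_equal_get_dag_uri : Prop := ∀ (namespace_ : Option String) (dag : Option String) (topic : Option String), Dom_get_dag_uri namespace_ dag topic → Pre_get_dag_uri namespace_ dag topic → Spec_get_dag_uri namespace_ dag topic (get_dag_uri namespace_ dag topic)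

-- ===== LEMMAS AND PROOFS =====

-- A's search phase (uid not yet found) takes exactly pvFindP's steps
theorem pvALoop_search (segs : List String) : ∀ i : Nat,
    pvALoop segs none none none i =
      (match pvFindP segs i with
       | none => (none, none, none)
       | some p => pvALoop segs none none (some (segs.getD p "")) (p - 1))
  | 0 => rfl
  | 1 => rfl
  | (i+2) => by
    rw [pvALoop, pvFindP]
    split_ifs with h
    · rfl
    · rw [pvALoop_search segs (i+1)]

theorem pvFindP_bounds (segs : List String) : ∀ i p : Nat,
    pvFindP segs i = some p → 2 ≤ p ∧ p ≤ i ∧ PySem.Str.len (segs.getD p "") = 32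
  | 0, p => by simp [pvFindP]
  | 1, p => by simp [pvFindP]
  | (i+2), p => by
    rw [pvFindP]
    split_ifs with h
    · rintro ⟨rfl⟩; exact ⟨by omega, by omega, h⟩
    · intro hrec
      obtain ⟨h1, h2, h3⟩ := pvFindP_bounds segs (i+1) p hrec
      exact ⟨h1, by omega, h3⟩

theorem pvFindP_ge (segs : List String) : ∀ i q : Nat, 2 ≤ q → q ≤ i →
    PySem.Str.len (segs.getD q "") = 32 → ∃ p, pvFindP segs i = some p ∧ q ≤ p
  | 0, q => by omega
  | 1, q => by omega
  | (i+2), q => by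
    intro hq2 hqi hq32
    rw [pvFindP]
    split_ifs with h
    · exact ⟨i+2, rfl, by omega⟩
    · have hne : q ≠ i+2 := by rintro rfl; exact h hq32
      obtain ⟨p, hp, hqp⟩ := pvFindP_ge segs (i+1) q hq2 (by omega) hq32
      exact ⟨p, hp, hqp⟩

-- the address step: one unfolding at pos = q+2 with uid set
theorem pvALoop_addr (segs : List String) (u : String) (q : Nat) :
    pvALoop segs none none (some u) (q+2) =
      pvALoop segs none (some (segs.getD (q+2) "")) (some u) (q+1) := by
  rw [pvALoop]

-- A's location accumulator, isolated
def pvLocAcc (segs : List String) : Nat → String → String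
  | 0, l => l
  | 1, l => l
  | (pos+2), l => pvLocAcc segs (pos+1) (segs.getD (pos+2) "" ++ "-" ++ l)

theorem pvALoop_loc_some (segs : List String) (a u : String) : ∀ (pos : Nat) (l : String),
    pvALoop segs (some l) (some a) (some u) pos = (some (pvLocAcc segs pos l), some a, some u)
  | 0, l => rfl
  | 1, l => rfl
  | (pos+2), l => by
    rw [pvALoop, pvLocAcc]
    exact pvALoop_loc_some segs a u (pos+1) _

theorem pvALoop_loc_start (segs : List String) (a u : String) (q : Nat) :
    pvALoop segs none (some a) (some u) (q+2) =
      (some (pvLocAcc segs (q+1) (segs.getD (q+2) "")), some a, some u) := by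
  rw [pvALoop]
  exact pvALoop_loc_some segs a u (q+1) _

-- join absorbs a merged last element
theorem pvCjoin_merge (sep a b : List Char) : ∀ xs : List (List Char),
    PySem.Chars.join sep (xs ++ [a ++ sep ++ b]) = PySem.Chars.join sep (xs ++ [a, b])
  | [] => by
    simp [PySem.Chars.join_singleton, PySem.Chars.join_cons_cons]
  | [x] => by
    simp [PySem.Chars.join_singleton, PySem.Chars.join_cons_cons]
  | (x :: y :: xs) => by
    have h1 : (x :: y :: xs) ++ [a ++ sep ++ b] = x :: ((y :: xs) ++ [a ++ sep ++ b]) := rfl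
    have h2 : (x :: y :: xs) ++ [a, b] = x :: ((y :: xs) ++ [a, b]) := rfl
    rw [h1, h2]
    cases xs with
    | nil =>
      simp [PySem.Chars.join_cons_cons, PySem.Chars.join_singleton]
    | cons z zs =>
      rw [show (y :: z :: zs) ++ [a ++ sep ++ b] = y :: ((z :: zs) ++ [a ++ sep ++ b]) from rfl,
          show (y :: z :: zs) ++ [a, b] = y :: ((z :: zs) ++ [a, b]) from rfl] at *
      rw [PySem.Chars.join_cons_cons, PySem.Chars.join_cons_cons]
      have := pvCjoin_merge sep a b (y :: z :: zs)
      simp [PySem.Chars.join_cons_cons] at this ⊢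
      exact this

theorem pvJoin_merge (a b : String) (xs : List String) :
    PySem.Str.join "-" (xs ++ [a ++ "-" ++ b]) = PySem.Str.join "-" (xs ++ [a, b]) := by
  apply String.toList_inj.mp
  rw [PySem.Str.toList_join, PySem.Str.toList_join]
  simp only [List.map_append, List.map_cons, List.map_nil, String.toList_append]
  have : ("-" : String).toList = ['-'] := rfl
  rw [this]
  exact pvCjoin_merge ['-'] a.toList b.toList (xs.map String.toList)

-- pvLocAcc builds the dash-join of segs[2..pos] in front of the seed
theorem pvLocAcc_join (segs : List String) : ∀ (pos : Nat) (l : String),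
    pvLocAcc segs pos l =
      PySem.Str.join "-" (((List.range' 2 (pos - 1)).map (fun i => segs.getD i "")) ++ [l])
  | 0, l => by simp [pvLocAcc, PySem.Str.join]
  | 1, l => by simp [pvLocAcc, PySem.Str.join]
  | (pos+2), l => by
    rw [pvLocAcc, pvLocAcc_join segs (pos+1) _]
    have hr : List.range' 2 (pos + 1) = List.range' 2 pos ++ [2 + 1 * pos] := List.range'_concat
    have h2 : pos + 2 - 1 = pos + 1 := rfl
    have h3 : pos + 1 - 1 = pos := rfl
    rw [h2, h3, hr]
    simp only [List.map_append, List.map_cons, List.map_nil, List.append_assoc]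
    have h4 : (2 + 1 * pos) = pos + 2 := by omega
    rw [h4]
    exact pvJoin_merge (segs.getD (pos+2) "") l (List.range' 2 pos |>.map (fun i => segs.getD i ""))

-- drop/take window as an index map
theorem pvWindow (segs : List String) : ∀ (k : Nat), 2 + k ≤ segs.length →
    (segs.drop 2).take k = (List.range' 2 k).map (fun i => segs.getD i "") := by
  intro k hk
  apply List.ext_getElem
  · simp; omega
  · intro i h1 h2
    simp only [List.getElem_take, List.getElem_drop, List.getElem_map, List.getElem_range']
    rw [List.getD_eq_getElem segs "" (by simp at h1 ⊢; omega)]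
    congr 1
    omega

-- the main per-segs equality: A's loop answer = B's index answer
theorem pvMain (segs : List String) (hlen : 4 ≤ segs.length)
    (p : Nat) (hfind : pvFindP segs (segs.length - 1) = some p) (hp3 : 3 ≤ p) :
    pvALoop segs none none none (segs.length - 1) =
      (if p = 3 then none
       else some (PySem.Str.join "-" (PySem.List.slice segs (some 2) (some ((p : Int) - 1)))),
       some (segs.getD (p-1) ""), some (segs.getD p "")) := by
  obtain ⟨hp2, hple, hp32⟩ := pvFindP_bounds segs (segs.length - 1) p hfind
  have hslice : PySem.List.slice segs (some 2) (some ((p : Int) - 1)) = (segs.drop 2).take (p - 3) := by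
    have hcast : ((p : Int) - 1) = ((p - 1 : Nat) : Int) := by omega
    have h2 : (2 : Int) = ((2 : Nat) : Int) := rfl
    rw [hcast, h2, PySem.List.slice_natCast]
    congr 1
  obtain ⟨q, rfl⟩ : ∃ q, p = q + 3 := ⟨p - 3, by omega⟩
  have hstep : pvALoop segs none none none (segs.length - 1) =
      pvALoop segs none none (some (segs.getD (q+3) "")) (q+2) := by
    rw [pvALoop_search segs (segs.length - 1), hfind]
    rfl
  rw [hstep, pvALoop_addr]
  cases q with
  | zero => simp [pvALoop]
  | succ q' =>
    rw [pvALoop_loc_start, pvLocAcc_join]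
    have hne : ¬ (q' + 1 + 3 = 3) := by omega
    rw [if_neg hne, hslice]
    have hw : (segs.drop 2).take (q' + 1 + 3 - 3) = (List.range' 2 (q'+1)).map (fun i => segs.getD i "") :=
      pvWindow segs (q'+1) (by omega)
    rw [hw]
    have hr : List.range' 2 (q'+1) = List.range' 2 q' ++ [2 + 1 * q'] := List.range'_concat
    rw [hr]
    have h2 : 2 + 1 * q' = q' + 2 := by omega
    rw [h2]
    have h3 : q' + 1 + 2 - 1 = q' + 2 := rfl
    simp [List.map_append]

theorem pvTail (ns : Option String) (segs : List String) (h4' : 4 ≤ segs.length)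
    (hex : ∃ p < segs.length, 3 ≤ p ∧ PySem.Str.len (segs.getD p "") = 32) :
    (if segs.length < 4 then ((none : Option String), "")
     else match pvALoop segs none none none (segs.length - 1) with
       | (loc, some address, some uid) =>
         ((match ns with | none => some (segs.getD 0 "") | some n => some n),
          (segs.getD 1 "" ++ "://" ++ (match loc with | none => "" | some l => l ++ "@")) ++ address ++ "/dag/b" ++ uid)
       | _ => (none, "")) =
    (if segs.length < 4 then (none, "")
     else match pvFindP segs (segs.length - 1) with
       | none => (none, "")
       | some p => if p < 3 then (none, "")
         else ((match ns with | none => some (segs.getD 0 "") | some n => some n),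
           (segs.getD 1 "" ++ "://" ++ (if p = 3 then "" else PySem.Str.join "-" (PySem.List.slice segs (some 2) (some ((p:Int) - 1))) ++ "@")) ++ segs.getD (p-1) "" ++ "/dag/b" ++ segs.getD p "")) := by
  have hlt : ¬ (segs.length < 4) := by omega
  rw [if_neg hlt, if_neg hlt]
  obtain ⟨q, hqlen, hq3, hq32⟩ := hex
  obtain ⟨p, hfind, hqp⟩ := pvFindP_ge segs (segs.length - 1) q (by omega) (by omega) hq32
  obtain ⟨hp2, hple, hp32⟩ := pvFindP_bounds _ _ _ hfind
  have hp3 : 3 ≤ p := by omega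
  rw [hfind, pvMain segs h4' p hfind hp3]
  have hnp : ¬ (p < 3) := by omega
  by_cases hp : p = 3 <;> simp [hp, hnp]

-- ===== VERDICT (by name: the statement is the Claim_ definition above) =====
theorem get_dag_uri_spec : Claim_equal_get_dag_uri := by
  intro namespace_ dag topic _hdom hpre
  unfold Spec_get_dag_uri
  cases dag with
  | some d => rfl
  | none =>
    rcases hpre with hd | ⟨hchop, h4, hex⟩
    · simp at hd
    · cases topic with
      | none => rcases hchop with h | h <;> exact absurd h (by decide)
      | some t =>
        simp only [Option.getD_some] at hchop h4 hex
        by_cases hA : PySem.Str.startswith t "xyme-output-" = true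
        · have h12 : PySem.Str.len "xyme-output-" = (12 : Int) := by decide
          simp only [get_dag_uri, get_dag_uri_alt, hA, if_true, Bool.false_eq_true, if_false]
          rw [h12]
          have hs : (PySem.Str.split? (PySem.Str.slice t (some 12) none) "-").isSome :=
            Option.isSome_of_mem rfl
          obtain ⟨segs, hsegs⟩ := Option.isSome_iff_exists.mp hs
          have hseg' : pvSegsOf t = segs := by unfold pvSegsOf; rw [if_pos hA, hsegs]; rfl
          rw [hsegs]
          rw [hseg'] at h4 hex
          exact pvTail namespace_ segs h4 hex
        · have hB : PySem.Str.startswith t "xyme-input-" = true := by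
            rcases hchop with h | h
            · exact absurd h hA
            · exact h
          have h11 : PySem.Str.len "xyme-input-" = (11 : Int) := by decide
          simp only [get_dag_uri, get_dag_uri_alt, hA, hB, if_true, Bool.false_eq_true, if_false]
          rw [h11]
          have hs : (PySem.Str.split? (PySem.Str.slice t (some 11) none) "-").isSome :=
            Option.isSome_of_mem rfl
          obtain ⟨segs, hsegs⟩ := Option.isSome_iff_exists.mp hs
          have hseg' : pvSegsOf t = segs := by unfold pvSegsOf; rw [if_neg hA, hsegs]; rfl
          rw [hsegs]
          rw [hseg'] at h4 hex
          exact pvTail namespace_ segs h4 hex
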